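-- pv_equiv track=rewrite | github.com/AgentCheems/cs12lab03 | lab01.py | duel_merge
-- ===== SOURCE A (Python) =====
-- def duel_merge(gridline:list[int])-> list[int]:
--     n = len(gridline)
--     grid_nonzero = [x for x in gridline if x!=0] #removes zero from list[int]
--     res: list[int] = [] #
--     i = 0
--     while i<len(grid_nonzero):
--         if len(grid_nonzero)>i+1 and grid_nonzero[i] == grid_nonzero[i+1]:
--             res.append(grid_nonzero[i] + 1) #adds adjacent element and stores to res
--             i += 2 #skip next index since previous index resting
--         else:
--             res.append(grid_nonzero[i]) #if not equal, append element and go next index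
--             i += 1
--     add_zero = [0]*(n-len(res)) #adds zero at end of res
--     new_col = res + add_zero
--     return new_col
-- ===== SOURCE B (Python) =====
-- def duel_merge(gridline: list[int]) -> list[int]:
--     res = []
--     pending = None
--     for x in gridline:
--         if x == 0:
--             continue
--         if pending is None:
--             pending = x
--         elif x == pending:
--             res.append(pending + 1)
--             pending = None
--         else:
--             res.append(pending)
--             pending = x
--     if pending is not None:
--         res.append(pending)
--     res += [0] * (len(gridline) - len(res))
--     return res
-- ===== Notes on version B (the rewrite author's own statement) =====
-- stated objective: faster
-- what changed: Single pass over the original list carrying a 'pending' unmerged value, instead of filtering zeros into a new intermediate list first and then pairing with an explicit index loop; same O(n) asymptotics but no intermediate list and fewer passes.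
import Mathlib
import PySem

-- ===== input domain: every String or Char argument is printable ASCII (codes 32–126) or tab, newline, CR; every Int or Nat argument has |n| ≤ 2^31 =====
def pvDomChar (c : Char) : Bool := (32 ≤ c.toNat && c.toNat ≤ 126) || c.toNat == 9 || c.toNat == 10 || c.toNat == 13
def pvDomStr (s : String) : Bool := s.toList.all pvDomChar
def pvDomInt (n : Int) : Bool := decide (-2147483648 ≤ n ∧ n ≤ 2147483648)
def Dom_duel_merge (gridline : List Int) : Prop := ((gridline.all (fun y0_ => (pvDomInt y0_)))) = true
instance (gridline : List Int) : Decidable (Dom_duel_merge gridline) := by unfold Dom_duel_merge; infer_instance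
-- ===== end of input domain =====

-- B is an alternative single-pass decomposition (pending-value fold) of A's filter-then-index-loop; same O(n) cost.

-- ===== PORT A =====
-- A's while loop over grid_nonzero advances i by 1 or 2; as structural recursion on the suffix:
def duelMergeLoop : List Int → List Int
  | [] => []
  | [a] => [a]
  | a :: b :: rest =>
    if a = b then (a + 1) :: duelMergeLoop rest
    else a :: duelMergeLoop (b :: rest)

def duel_merge (gridline : List Int) : List Int :=
  let n : Int := gridline.length
  let grid_nonzero := gridline.filter (fun x => x ≠ 0)
  let res := duelMergeLoop grid_nonzero
  res ++ List.replicate (n - (res.length : Int)).toNat 0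

-- ===== PORT B =====
def duelStep (st : List Int × Option Int) (x : Int) : List Int × Option Int :=
  if x = 0 then st
  else
    match st.2 with
    | none => (st.1, some x)
    | some p => if x = p then (st.1 ++ [p + 1], none) else (st.1 ++ [p], some x)

def duel_merge_alt (gridline : List Int) : List Int :=
  let st := gridline.foldl duelStep ([], none)
  let res := st.1 ++ (match st.2 with | some p => [p] | none => [])
  res ++ List.replicate (gridline.length - res.length) 0

-- ===== PRECONDITION & SPEC =====
def Spec_duel_merge (gridline : List Int) (out : List Int) : Prop := out = duel_merge_alt gridline
instance (gridline : List Int) (out : List Int) : Decidable (Spec_duel_merge gridline out) := by unfold Spec_duel_merge; infer_instance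

-- ===== CLAIM (what is proved, stated in full; the proofs are below) =====
def Claim_equal_duel_merge : Prop := ∀ (gridline : List Int), Dom_duel_merge gridline → Spec_duel_merge gridline (duel_merge gridline)

-- ===== LEMMAS AND PROOFS =====

-- g po l : what B's fold produces (already-emitted part dropped) from pending state po over remaining input l, flushed at the end
def duelG : Option Int → List Int → List Int
  | po, [] => po.toList
  | po, x :: r =>
    if x = 0 then duelG po r
    else
      match po with
      | none => duelG (some x) r
      | some p => if x = p then (p + 1) :: duelG none r else p :: duelG (some x) r

theorem duelG_foldl (l : List Int) : ∀ (acc : List Int) (po : Option Int),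
    (let st := l.foldl duelStep (acc, po)
     st.1 ++ (match st.2 with | some p => [p] | none => [])) = acc ++ duelG po l := by
  induction l with
  | nil =>
    intro acc po
    cases po <;> simp [duelG, Option.toList]
  | cons x r ih =>
    intro acc po
    simp only [List.foldl_cons, duelG, duelStep]
    by_cases hx : x = 0
    · simp [hx, ih]
    · cases po with
      | none => simp [hx, ih]
      | some p =>
        by_cases hp : x = p
        · subst hp; simp [hx, ih]
        · simp [hx, hp, ih]

theorem duelG_eq_mergeLoop (l : List Int) : ∀ (po : Option Int),
    duelG po l = duelMergeLoop (po.toList ++ l.filter (fun x => x ≠ 0)) := by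
  induction l with
  | nil => intro po; cases po with
    | none => simp [duelG, duelMergeLoop]
    | some p => simp [duelG, duelMergeLoop, Option.toList]
  | cons x r ih =>
    intro po
    by_cases hx : x = 0
    · cases po <;> simp [duelG, hx, ih, List.filter]
    · cases po with
      | none =>
        simp only [duelG, if_neg hx, Option.toList, List.nil_append]
        rw [ih (some x)]
        simp [List.filter, hx]
      | some p =>
        simp only [duelG, if_neg hx, Option.toList]
        have hf : (x :: r).filter (fun x => (x ≠ 0 : Prop)) = x :: r.filter (fun x => (x ≠ 0 : Prop)) := by
          simp [List.filter, hx]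
        by_cases hp : x = p
        · rw [if_pos hp, ih none]
          simp only [Option.toList, List.nil_append, hf]
          simp [duelMergeLoop, hp]
        · rw [if_neg hp, ih (some x)]
          simp only [Option.toList, hf]
          have hpx : ¬ p = x := fun h => hp h.symm
          simp [duelMergeLoop, hpx]

-- ===== VERDICT (by name: the statement is the Claim_ definition above) =====
theorem duel_merge_spec : Claim_equal_duel_merge := by
  intro gridline _
  unfold Spec_duel_merge duel_merge duel_merge_alt
  dsimp only
  have h := duelG_foldl gridline [] none
  simp only [List.nil_append] at h
  rw [h, duelG_eq_mergeLoop gridline none]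
  simp only [Option.toList, List.nil_append]
  congr 1
  have : ((gridline.length : Int) - ((duelMergeLoop (gridline.filter (fun x => x ≠ 0))).length : Int)).toNat
      = gridline.length - (duelMergeLoop (gridline.filter (fun x => x ≠ 0))).length := by omega
  rw [this]
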